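-- pv_equiv track=rewrite | github.com/MrBrantCode/unitest_baseline | mut_generate/mist_train_taco/taco_2712/solution.py | is_possible_to_group
-- ===== SOURCE A (Python) =====
-- def is_possible_to_group(N, K, arr):
--     freq = {}
--     for num in arr:
--         if num not in freq:
--             freq[num] = 0
--         freq[num] += 1
--
--     max_freq = max(freq.values())
--
--     if max_freq > 2 * K:
--         return 0
--     return 1
-- ===== SOURCE B (Python) =====
-- def is_possible_to_group(N, K, arr):
--     best = 0
--     run = 0
--     prev = None
--     for x in sorted(arr):
--         run = run + 1 if x == prev else 1
--         prev = x
--         if run > best: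
--             best = run
--     return 0 if best > 2 * K else 1
-- ===== Notes on version B (the rewrite author's own statement) =====
-- stated objective: alternative
-- what changed: Replaces the frequency dictionary with sort-then-scan: B sorts the list and tracks the longest run of equal consecutive elements, which on a sorted list is the maximum frequency.
import Mathlib
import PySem

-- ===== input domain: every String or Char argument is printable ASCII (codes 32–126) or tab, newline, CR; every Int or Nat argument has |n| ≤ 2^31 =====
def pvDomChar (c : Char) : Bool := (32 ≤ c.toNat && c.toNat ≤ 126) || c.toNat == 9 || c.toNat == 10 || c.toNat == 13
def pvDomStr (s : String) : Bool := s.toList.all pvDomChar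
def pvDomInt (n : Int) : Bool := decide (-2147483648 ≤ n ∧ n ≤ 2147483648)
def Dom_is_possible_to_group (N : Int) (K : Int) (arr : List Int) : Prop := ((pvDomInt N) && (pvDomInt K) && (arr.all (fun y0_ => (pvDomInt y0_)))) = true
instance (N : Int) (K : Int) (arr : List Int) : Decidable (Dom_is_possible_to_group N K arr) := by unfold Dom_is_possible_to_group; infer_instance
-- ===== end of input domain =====

-- B replaces A's frequency dictionary with sort-then-scan: the maximum frequency is the longest
-- run of equal consecutive elements in the sorted list (alternative algorithm, similar cost);
-- Pre_ excludes only the empty list, where A's max() raises ValueError.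


-- ===== PORT A =====
def is_possible_to_group (N : Int) (K : Int) (arr : List Int) : Int :=
  let freq := arr.foldl (fun d num =>
    let d := if d.contains num then d else d.insert num (0 : Int)  -- if num not in freq: freq[num] = 0
    d.insert num (d.getD num 0 + 1))                                -- freq[num] += 1
    PySem.Dict.empty
  match PySem.List.max? freq.values (fun y => y) with
  | none => 0        -- max() over the empty values view raises ValueError; excluded by Pre_
  | some max_freq => if max_freq > 2 * K then 0 else 1

-- ===== PORT B =====
-- loop state = (best, run, prev), exactly as in Source B; prev starts as None
def pvRunStep (st : Int × Int × Option Int) (x : Int) : Int × Int × Option Int :=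
  let run : Int := if some x = st.2.2 then st.2.1 + 1 else 1
  (if run > st.1 then run else st.1, run, some x)

def is_possible_to_group_alt (N : Int) (K : Int) (arr : List Int) : Int :=
  let st := (PySem.List.sorted arr (fun y => y)).foldl pvRunStep (0, 0, none)
  if st.1 > 2 * K then 0 else 1

-- ===== PRECONDITION & SPEC =====
-- Pre_ excludes only the empty list, on which A's max() raises ValueError.
def Pre_is_possible_to_group (N : Int) (K : Int) (arr : List Int) : Prop := arr ≠ []
instance (N : Int) (K : Int) (arr : List Int) : Decidable (Pre_is_possible_to_group N K arr) := by unfold Pre_is_possible_to_group; infer_instance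
def pvWitness_is_possible_to_group : Int × Int × List Int := (3, 1, [5, 5, 7])

def Spec_is_possible_to_group (N : Int) (K : Int) (arr : List Int) (out : Int) : Prop := out = is_possible_to_group_alt N K arr
instance (N : Int) (K : Int) (arr : List Int) (out : Int) : Decidable (Spec_is_possible_to_group N K arr out) := by unfold Spec_is_possible_to_group; infer_instance

-- ===== CLAIM (what is proved, stated in full; the proofs are below) =====
def Claim_equal_is_possible_to_group : Prop := ∀ (N : Int) (K : Int) (arr : List Int), Dom_is_possible_to_group N K arr → Pre_is_possible_to_group N K arr → Spec_is_possible_to_group N K arr (is_possible_to_group N K arr)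

-- ===== LEMMAS AND PROOFS =====

-- A's guarded update step is exactly Counter's modify step.
lemma pvStepA_eq_modify (d : PySem.Dict Int Int) (num : Int) :
    (let d' := if d.contains num then d else d.insert num (0 : Int)
     d'.insert num (d'.getD num 0 + 1)) = d.modify num 0 (· + 1) := by
  cases h : d.contains num
  · simp only [h, Bool.false_eq_true, if_false, PySem.Dict.modify, PySem.Dict.getD_insert_self,
      PySem.Dict.getD_of_not_contains d 0 h, PySem.Dict.insert_insert_self]
  · simp only [h, if_true, PySem.Dict.modify]

-- hence A's whole dict-building loop is Counter(arr)
lemma pvFreq_eq_counter (arr : List Int) :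
    arr.foldl (fun d num =>
      let d := if d.contains num then d else d.insert num (0 : Int)
      d.insert num (d.getD num 0 + 1)) PySem.Dict.empty = PySem.Dict.counter arr := by
  rw [PySem.Dict.counter_eq_foldl]
  apply PySem.List.foldl_congr_mem
  intro d num _
  exact pvStepA_eq_modify d num

lemma pvStep_eq (b r p x : Int) : pvRunStep (b, r, some p) x =
    (max b (if x = p then r + 1 else 1), (if x = p then r + 1 else 1), some x) := by
  by_cases h : x = p <;> simp [pvRunStep, h, Prod.ext_iff] <;> omega

-- the run-length scan over a nondecreasing nonempty list computes the maximal element count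
lemma pvRunFold_spec (s : List Int) (hne : s ≠ []) (hs : s.Pairwise (· ≤ ·)) :
    ∃ b p, s.foldl pvRunStep (0, 0, none) = (b, (s.count p : Int), some p) ∧
      p ∈ s ∧ (∀ x ∈ s, x ≤ p) ∧
      (∃ v ∈ s, b = (s.count v : Int)) ∧ (∀ v ∈ s, (s.count v : Int) ≤ b) := by
  induction s using List.reverseRecOn with
  | nil => exact absurd rfl hne
  | append_singleton t x ih =>
    rcases List.pairwise_append.mp hs with ⟨ht, -, hle⟩
    simp only [List.mem_singleton] at hle
    by_cases htn : t = []
    · subst htn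
      exact ⟨1, x, by simp [pvRunStep], by simp, by simp, ⟨x, by simp⟩, by simp⟩
    · obtain ⟨b, p, hfold, hpmem, hpmax, ⟨v0, hv0mem, hv0⟩, hdom⟩ := ih htn ht
      rw [List.foldl_append, hfold]
      simp only [List.foldl_cons, List.foldl_nil, pvStep_eq]
      by_cases hxp : x = p
      · subst hxp
        have hcnt : ((t ++ [x]).count x : Int) = (t.count x : Int) + 1 := by
          simp [List.count_append]
        refine ⟨max b ((t.count x : Int) + 1), x, by simp [hcnt], by simp, ?_, ?_, ?_⟩
        · intro y hy
          rcases List.mem_append.mp hy with hy | hy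
          · exact hle y hy x rfl
          · simp at hy; omega
        · by_cases h : b ≤ (t.count x : Int) + 1
          · exact ⟨x, by simp, by rw [max_eq_right h, hcnt]⟩
          · refine ⟨v0, by simp [hv0mem], ?_⟩
            have hne0 : v0 ≠ x := by
              intro he; subst he; omega
            rw [max_eq_left (by omega), hv0]
            simp [List.count_append, List.count_singleton, Ne.symm hne0]
        · intro v hv
          rcases List.mem_append.mp hv with hv | hv
          · by_cases hvx : v = x
            · subst hvx; rw [hcnt]; omega
            · have : ((t ++ [x]).count v : Int) = (t.count v : Int) := by
                simp [List.count_append, List.count_eq_zero.mpr (by simp [hvx] : v ∉ [x])]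
              rw [this]; exact le_trans (hdom v hv) (le_max_left _ _)
          · simp at hv; subst hv; rw [hcnt]; omega
      · have hxt : x ∉ t := fun hxin => hxp (le_antisymm (hpmax x hxin) (hle p hpmem x rfl))
        have ht0 : t.count x = 0 := List.count_eq_zero_of_not_mem hxt
        have hcnt1 : ((t ++ [x]).count x : Int) = 1 := by
          simp [List.count_append, ht0]
        refine ⟨max b 1, x, by simp [hxp, hcnt1, ht0], by simp, ?_, ?_, ?_⟩
        · intro y hy
          rcases List.mem_append.mp hy with hy | hy
          · exact hle y hy x rfl
          · simp at hy; omega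
        · by_cases h : b ≤ 1
          · exact ⟨x, by simp, by rw [max_eq_right h, hcnt1]⟩
          · have hne0 : v0 ≠ x := fun he => hxt (he ▸ hv0mem)
            refine ⟨v0, by simp [hv0mem], ?_⟩
            rw [max_eq_left (by omega), hv0]
            simp [List.count_append, List.count_singleton, Ne.symm hne0]
        · intro v hv
          rcases List.mem_append.mp hv with hv | hv
          · have hvx : v ≠ x := fun he => hxt (he ▸ hv)
            have : ((t ++ [x]).count v : Int) = (t.count v : Int) := by
              simp [List.count_append, List.count_singleton, Ne.symm hvx]
            rw [this]; exact le_trans (hdom v hv) (le_max_left _ _)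
          · simp at hv; subst hv; rw [hcnt1]; omega

-- ===== VERDICT (by name: the statement is the Claim_ definition above) =====
theorem is_possible_to_group_spec : Claim_equal_is_possible_to_group := by
  intro N K arr _ hpre
  unfold Spec_is_possible_to_group
  unfold Pre_is_possible_to_group at hpre
  -- B side
  have hperm : (PySem.List.sorted arr (fun y => y)).Perm arr := PySem.List.sorted_perm arr (fun y => y) false
  have hsne : PySem.List.sorted arr (fun y => y) ≠ [] := by
    intro h
    exact hpre (List.eq_nil_of_length_eq_zero (by simpa [h] using hperm.length_eq.symm))
  obtain ⟨b, p, hfold, -, -, ⟨vb, hvbmem, hvb⟩, hbdom⟩ :=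
    pvRunFold_spec _ hsne (PySem.List.sorted_pairwise arr (fun y => y))
  have hBalt : is_possible_to_group_alt N K arr = if b > 2 * K then 0 else 1 := by
    simp only [is_possible_to_group_alt, hfold]
  -- A side: the dict is Counter(arr), its values are the counts of the distinct elements
  have hvals : (arr.foldl (fun d num =>
      let d := if d.contains num then d else d.insert num (0 : Int)
      d.insert num (d.getD num 0 + 1)) PySem.Dict.empty).values
      = (PySem.Set.ofList arr).map (fun k => ((arr.count k : Nat) : Int)) := by
    rw [pvFreq_eq_counter]
    show (PySem.Dict.counter arr).items.map Prod.snd = _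
    rw [PySem.Dict.items_counter]
    simp [List.map_map, Function.comp]
  obtain ⟨a0, ha0⟩ := List.exists_mem_of_ne_nil arr hpre
  have hvne : (PySem.Set.ofList arr).map (fun k => ((arr.count k : Nat) : Int)) ≠ [] := by
    intro h
    rw [List.map_eq_nil_iff] at h
    exact (List.not_mem_nil (a := a0)) (h ▸ (PySem.Set.mem_ofList arr a0).mpr ha0)
  cases hmax : PySem.List.max? ((PySem.Set.ofList arr).map (fun k => ((arr.count k : Nat) : Int))) (fun y => y) with
  | none => exact absurd ((PySem.List.max?_eq_none_iff _ _).mp hmax) hvne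
  | some m =>
    have hA : is_possible_to_group N K arr = if m > 2 * K then 0 else 1 := by
      simp only [is_possible_to_group, hvals, hmax]
    obtain ⟨u, humem, hum⟩ := List.mem_map.mp (PySem.List.max?_mem hmax)
    have humem' : u ∈ arr := (PySem.Set.mem_ofList arr u).mp humem
    have hmdom : ∀ v ∈ arr, ((arr.count v : Nat) : Int) ≤ m := by
      intro v hv
      exact PySem.List.max?_isMax hmax _ (List.mem_map.mpr ⟨v, (PySem.Set.mem_ofList arr v).mpr hv, rfl⟩)
    have hcnt : ∀ v, (PySem.List.sorted arr (fun y => y)).count v = arr.count v := fun v => hperm.count_eq v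
    have hmb : m = b := by
      apply le_antisymm
      · rw [← hum]
        have := hbdom u (hperm.mem_iff.mpr humem')
        rwa [hcnt] at this
      · rw [hvb, hcnt]
        exact hmdom vb (hperm.mem_iff.mp hvbmem)
    rw [hA, hBalt, hmb]
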